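-- pv_equiv track=rewrite | github.com/Leapense/problems | 27264번: Два подарка/Main.py | max_pair_sum
-- ===== SOURCE A (Python) =====
-- def max_pair_sum(prices, x):
--     prices.sort()
--     l, r = 0, len(prices) - 1
--     best = 0
--     while l < r:
--         s = prices[l] + prices[r]
--         if s > x:
--             r -= 1
--         else:
--             if s > best:
--                 best = s
--             l += 1
--     return best
-- ===== SOURCE B (Python) =====
-- def max_pair_sum(prices, x):
--     # alternative: sort + per-element binary search (rightmost insertion point)
--     # instead of two converging pointers; sorts prices in place like the original
--     prices.sort()
--     n = len(prices)
--     best = 0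
--     for i in range(n):
--         t = x - prices[i]
--         lo, hi = 0, n  # rightmost insertion point of t in sorted prices
--         while lo < hi:
--             mid = (lo + hi) // 2
--             if t < prices[mid]:
--                 hi = mid
--             else:
--                 lo = mid + 1
--         j = lo - 1
--         if j > i:
--             best = max(best, prices[i] + prices[j])
--     return best
-- ===== Notes on version B (the rewrite author's own statement) =====
-- stated objective: alternative
-- what changed: Replaces the two converging pointers with a per-element binary search (rightmost insertion point of x - prices[i]) into the sorted array; same in-place sort and tie behaviour.
import Mathlib
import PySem

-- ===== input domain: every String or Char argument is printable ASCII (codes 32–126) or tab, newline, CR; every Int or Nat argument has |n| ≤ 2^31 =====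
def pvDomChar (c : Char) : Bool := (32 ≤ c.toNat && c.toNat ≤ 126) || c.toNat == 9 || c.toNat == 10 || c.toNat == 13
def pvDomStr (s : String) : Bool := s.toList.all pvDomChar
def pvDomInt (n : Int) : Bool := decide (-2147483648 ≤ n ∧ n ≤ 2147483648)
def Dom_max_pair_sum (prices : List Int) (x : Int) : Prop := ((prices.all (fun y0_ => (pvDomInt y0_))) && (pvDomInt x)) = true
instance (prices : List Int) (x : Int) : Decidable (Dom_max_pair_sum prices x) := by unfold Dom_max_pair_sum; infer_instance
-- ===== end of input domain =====

-- B replaces A's two-pointer scan with a per-element binary search into the sorted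
-- array (alternative algorithm, same cost class). Both Pythons sort `prices` in
-- place; the equivalence proved here is about the return value.

-- ===== PORT A =====
-- the while loop; l, r stay in range (0 ≤ l < r < len), so getD is exact for prices[l]/prices[r]
def tpGo (a : List Int) (x : Int) (best : Int) (l r : Nat) : Int :=
  if _h : l < r then
    let s := a.getD l 0 + a.getD r 0
    if s > x then tpGo a x best l (r - 1)
    else tpGo a x (if s > best then s else best) (l + 1) r
  else best
termination_by r - l

-- Python's r = len-1 is -1 only when the list is empty, and then the loop does not
-- run in either version, so Nat subtraction is exact here.
def max_pair_sum (prices : List Int) (x : Int) : Int :=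
  let a := PySem.List.sorted prices (fun v => v)
  tpGo a x 0 0 (a.length - 1)

-- ===== PORT B =====
-- The hand-written while loop in Source B (lo/hi midpoint halving, rightmost insertion
-- point) is exactly the loop PySem.List.bisectRight is defined as, so that is its
-- step-for-step port.  j = lo - 1 is kept as an Int (it can be -1 in Python).
def max_pair_sum_alt (prices : List Int) (x : Int) : Int :=
  let a := PySem.List.sorted prices (fun v => v)
  (List.range a.length).foldl (fun best i =>
    let j : Int := (PySem.List.bisectRight a (x - a.getD i 0) : Int) - 1
    if (i : Int) < j then max best (a.getD i 0 + a.getD j.toNat 0) else best) 0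

-- ===== PRECONDITION & SPEC =====
def Spec_max_pair_sum (prices : List Int) (x : Int) (out : Int) : Prop := out = max_pair_sum_alt prices x
instance (prices : List Int) (x : Int) (out : Int) : Decidable (Spec_max_pair_sum prices x out) := by unfold Spec_max_pair_sum; infer_instance

-- ===== CLAIM (what is proved, stated in full; the proofs are below) =====
def Claim_equal_max_pair_sum : Prop := ∀ (prices : List Int) (x : Int), Dom_max_pair_sum prices x → Spec_max_pair_sum prices x (max_pair_sum prices x)

-- ===== LEMMAS AND PROOFS =====

-- common reference value: max (with 0) over valid pairs, row by row
def rowStep (a : List Int) (x : Int) (i : Nat) (b : Int) (j : Nat) : Int :=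
  if a.getD i 0 + a.getD j 0 ≤ x then max b (a.getD i 0 + a.getD j 0) else b

def row (a : List Int) (x : Int) (i r : Nat) : Int :=
  (List.range' (i + 1) (r - i)).foldl (rowStep a x i) 0

def Mw (a : List Int) (x : Int) (l r : Nat) : Int :=
  (List.range' l (r + 1 - l)).foldl (fun b i => max b (row a x i r)) 0

-- generic fold lemmas
lemma foldl_base_le (step : Int → Nat → Int) (hmono : ∀ b i, b ≤ step b i) :
    ∀ (L : List Nat) (b : Int), b ≤ L.foldl step b := by
  intro L
  induction L with
  | nil => intro b; simp
  | cons i t ih => intro b; exact le_trans (hmono b i) (ih (step b i))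

lemma foldl_base_max (step : Int → Nat → Int)
    (hmono : ∀ b i, b ≤ step b i)
    (h : ∀ b i, 0 ≤ b → step b i = max b (step 0 i)) :
    ∀ (L : List Nat) (b : Int), 0 ≤ b → L.foldl step b = max b (L.foldl step 0) := by
  intro L
  induction L with
  | nil => intro b hb; simpa using (max_eq_left hb).symm
  | cons i t ih =>
      intro b hb
      have h0i : (0:Int) ≤ step 0 i := hmono 0 i
      have hb' : (0:Int) ≤ step b i := le_trans hb (hmono b i)
      simp only [List.foldl_cons]
      rw [ih (step b i) hb', ih (step 0 i) h0i, h b i hb]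
      have h0t : (0:Int) ≤ t.foldl step 0 := foldl_base_le step hmono t 0
      omega

lemma foldl_congr_nonneg (L : List Nat) (step1 step2 : Int → Nat → Int)
    (h1 : ∀ b i, b ≤ step1 b i)
    (h : ∀ b i, i ∈ L → 0 ≤ b → step1 b i = step2 b i) :
    ∀ b : Int, 0 ≤ b → L.foldl step1 b = L.foldl step2 b := by
  induction L with
  | nil => intro b hb; rfl
  | cons i t ih =>
      intro b hb
      simp only [List.foldl_cons]
      rw [h b i (by simp) hb]
      exact ih (fun b j hj hb' => h b j (by simp [hj]) hb') (step2 b i)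
        (le_trans hb (by rw [← h b i (by simp) hb]; exact h1 b i))

-- rowStep facts
lemma rowStep_mono (a : List Int) (x : Int) (i : Nat) : ∀ b j, b ≤ rowStep a x i b j := by
  intro b j; unfold rowStep; split <;> simp

lemma row_nonneg (a : List Int) (x : Int) (i r : Nat) : 0 ≤ row a x i r :=
  foldl_base_le (rowStep a x i) (rowStep_mono a x i) _ 0

lemma row_le (a : List Int) (x : Int) (i : Nat) (M : Int) :
    ∀ (L : List Nat) (b : Int), b ≤ M →
      (∀ j ∈ L, a.getD i 0 + a.getD j 0 ≤ x → a.getD i 0 + a.getD j 0 ≤ M) →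
      L.foldl (rowStep a x i) b ≤ M := by
  intro L
  induction L with
  | nil => intro b hb _; simpa using hb
  | cons j t ih =>
      intro b hb hall
      simp only [List.foldl_cons]
      refine ih _ ?_ (fun j' hj' => hall j' (by simp [hj']))
      unfold rowStep; split
      · exact max_le hb (hall j (by simp) (by assumption))
      · exact hb

lemma row_ge_mem (a : List Int) (x : Int) (i : Nat) :
    ∀ (L : List Nat) (b : Int) (j0 : Nat), j0 ∈ L →
      a.getD i 0 + a.getD j0 0 ≤ x →
      a.getD i 0 + a.getD j0 0 ≤ L.foldl (rowStep a x i) b := by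
  intro L
  induction L with
  | nil => intro b j0 h; simp at h
  | cons j t ih =>
      intro b j0 hmem hval
      simp only [List.foldl_cons]
      rcases List.mem_cons.1 hmem with h | h
      · subst h
        refine le_trans ?_ (foldl_base_le (rowStep a x i) (rowStep_mono a x i) t _)
        unfold rowStep
        rw [if_pos hval]
        exact le_max_right _ _
      · exact ih _ j0 h hval

lemma row_zero_of_none (a : List Int) (x : Int) (i : Nat) :
    ∀ (L : List Nat) (b : Int),
      (∀ j ∈ L, ¬ (a.getD i 0 + a.getD j 0 ≤ x)) →
      L.foldl (rowStep a x i) b = b := by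
  intro L
  induction L with
  | nil => intro b _; rfl
  | cons j t ih =>
      intro b hall
      simp only [List.foldl_cons]
      rw [show rowStep a x i b j = b by unfold rowStep; rw [if_neg (hall j (by simp))]]
      exact ih b (fun j' hj' => hall j' (by simp [hj']))

-- sortedness on getD
lemma getD_mono (a : List Int) (hs : a.Pairwise (· ≤ ·)) (i j : Nat)
    (hij : i ≤ j) (hj : j < a.length) : a.getD i 0 ≤ a.getD j 0 := by
  rcases Nat.lt_or_ge i j with h | h
  · rw [List.getD_eq_getElem a 0 (lt_of_le_of_lt hij hj), List.getD_eq_getElem a 0 hj]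
    exact List.pairwise_iff_getElem.1 hs i j _ _ h
  · have : i = j := le_antisymm hij h
    subst this; rfl

lemma Mw_nonneg (a : List Int) (x : Int) (l r : Nat) : 0 ≤ Mw a x l r :=
  foldl_base_le _ (fun b i => le_max_left _ _) _ 0

lemma Mw_step_base (a : List Int) (x : Int) (r : Nat) :
    ∀ (b : Int) (i : Nat), 0 ≤ b →
      (fun b i => max b (row a x i r)) b i = max b ((fun b i => max b (row a x i r)) 0 i) := by
  intro b i hb; dsimp only; omega

-- the two-pointer loop computes max best (window max)
lemma tpGo_eq (a : List Int) (x : Int) (hs : a.Pairwise (· ≤ ·)) :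
    ∀ (k l r : Nat) (best : Int), r - l = k → r < a.length → 0 ≤ best →
      tpGo a x best l r = max best (Mw a x l r) := by
  intro k
  induction k with
  | zero =>
      intro l r best hk hr hb
      have hnl : ¬ l < r := by omega
      rw [tpGo, dif_neg hnl]
      rcases Nat.lt_or_ge r l with h | h
      · have : r + 1 - l = 0 := by omega
        simp [Mw, this, max_eq_left hb]
      · have hlr : l = r := by omega
        subst hlr
        have : l + 1 - l = 1 := by omega
        simp [Mw, this, List.range'_one, row, max_eq_left hb]
  | succ k ih =>
      intro l r best hk hr hb
      have hlr : l < r := by omega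
      rw [tpGo, dif_pos hlr]
      simp only []
      by_cases hsx : a.getD l 0 + a.getD r 0 > x
      · rw [if_pos hsx]
        rw [ih l (r - 1) best (by omega) (by omega) hb]
        -- Mw l r = Mw l (r-1)
        have hsplit : List.range' l (r + 1 - l) = List.range' l (r - l) ++ [r] := by
          have h1 : r + 1 - l = (r - l) + 1 := by omega
          rw [h1, List.range'_concat, show l + 1 * (r - l) = r from by omega]
        have hrow : ∀ i ∈ List.range' l (r - l), row a x i r = row a x i (r - 1) := by
          intro i hi
          rcases List.mem_range'_1.1 hi with ⟨hli, hir⟩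
          have hir' : i < r := by omega
          have hinv : ¬ (a.getD i 0 + a.getD r 0 ≤ x) := by
            have := getD_mono a hs l i (by omega) (by omega)
            omega
          unfold row
          have h2 : r - i = (r - 1 - i) + 1 := by omega
          rw [h2, List.range'_concat, List.foldl_append]
          simp only [List.foldl_cons, List.foldl_nil]
          rw [show i + 1 + 1 * (r - 1 - i) = r from by omega]
          rw [show rowStep a x i _ r = _ from rfl]
          unfold rowStep
          rw [if_neg hinv]
        have hMw : Mw a x l r = Mw a x l (r - 1) := by
          unfold Mw
          rw [hsplit, List.foldl_append]
          simp only [List.foldl_cons, List.foldl_nil]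
          have hrr : row a x r r = 0 := by
            unfold row; rw [Nat.sub_self]; rfl
          rw [hrr]
          have hnn : 0 ≤ (List.range' l (r - l)).foldl (fun b i => max b (row a x i r)) 0 :=
            foldl_base_le _ (fun b i => le_max_left _ _) _ 0
          rw [max_eq_left hnn]
          rw [show r - 1 + 1 - l = r - l by omega]
          exact foldl_congr_nonneg _ _ _ (fun b i => le_max_left _ _)
            (fun b i hi _ => by rw [hrow i hi]) 0 le_rfl
        rw [hMw]
      · rw [if_neg hsx]
        set s := a.getD l 0 + a.getD r 0 with hsdef
        have hif : (if s > best then s else best) = max best s := by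
          split <;> omega
        rw [hif, ih (l + 1) r (max best s) (by omega) hr (le_trans hb (le_max_left _ _))]
        -- row l r = max 0 s
        have hrowl : row a x l r = max 0 s := by
          apply le_antisymm
          · refine row_le a x l (max 0 s) _ 0 (by omega) ?_
            intro j hj _
            rcases List.mem_range'_1.1 hj with ⟨hlj, hjr⟩
            have := getD_mono a hs j r (by omega) hr
            omega
          · have h1 : (0:Int) ≤ row a x l r := row_nonneg a x l r
            have h2 : s ≤ row a x l r := by
              refine row_ge_mem a x l _ 0 r ?_ (by omega)
              exact List.mem_range'_1.2 ⟨by omega, by omega⟩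
            omega
        -- Mw l r = max (max 0 (row l r)) (Mw (l+1) r)
        have hMw : Mw a x l r = max (max 0 (row a x l r)) (Mw a x (l + 1) r) := by
          unfold Mw
          rw [show r + 1 - l = (r - l) + 1 by omega, List.range'_succ, List.foldl_cons]
          rw [foldl_base_max _ (fun b i => le_max_left _ _) (Mw_step_base a x r) _ _ (by omega)]
          rw [show r + 1 - (l + 1) = r - l by omega]
        have hnn : 0 ≤ Mw a x (l + 1) r := Mw_nonneg a x (l + 1) r
        rw [hMw, hrowl]
        omega

-- B's fold equals the window max over all rows
lemma alt_fold_eq (a : List Int) (x : Int) (hs : a.Pairwise (· ≤ ·)) (hn : 0 < a.length) :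
    (List.range a.length).foldl (fun best i =>
      let j : Int := (PySem.List.bisectRight a (x - a.getD i 0) : Int) - 1
      if (i : Int) < j then max best (a.getD i 0 + a.getD j.toNat 0) else best) 0
    = Mw a x 0 (a.length - 1) := by
  set n := a.length with hndef
  have hrange : List.range n = List.range' 0 (n - 1 + 1 - 0) := by
    rw [show n - 1 + 1 - 0 = n by omega, List.range_eq_range']
  unfold Mw
  rw [← hrange]
  refine foldl_congr_nonneg (List.range n) _ _
    (fun b i => by dsimp only; split <;> simp) ?_ 0 le_rfl
  intro b i hi hb
  have hin : i < n := List.mem_range.1 hi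
  dsimp only
  set k := PySem.List.bisectRight a (x - a.getD i 0) with hkdef
  obtain ⟨hkn, hlt, hgt⟩ := PySem.List.bisectRight_spec a (x - a.getD i 0) hs
  by_cases hik : (i : Int) < (k : Int) - 1
  · have hk2 : i + 2 ≤ k := by omega
    have hk1n : k - 1 < n := by omega
    rw [if_pos hik]
    have htn : ((k : Int) - 1).toNat = k - 1 := by omega
    rw [htn]
    -- row i (n-1) = max 0 (a_i + a_(k-1))
    have hval : a.getD i 0 + a.getD (k - 1) 0 ≤ x := by
      have := hlt (k - 1) (by omega) (by omega)
      rw [List.getD_eq_getElem a 0 (by omega : k - 1 < a.length)]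
      omega
    have hrow : row a x i (n - 1) = max 0 (a.getD i 0 + a.getD (k - 1) 0) := by
      apply le_antisymm
      · refine row_le a x i _ _ 0 (by omega) ?_
        intro j hj hvj
        rcases List.mem_range'_1.1 hj with ⟨hij, hjr⟩
        have hjn : j < n := by omega
        rcases Nat.lt_or_ge j k with h | h
        · have := getD_mono a hs j (k - 1) (by omega) (by omega)
          omega
        · exfalso
          have := hgt j (by omega) h
          rw [List.getD_eq_getElem a 0 (by omega : j < a.length)] at hvj
          omega
      · have h2 : a.getD i 0 + a.getD (k - 1) 0 ≤ row a x i (n - 1) := by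
          refine row_ge_mem a x i _ 0 (k - 1) ?_ hval
          exact List.mem_range'_1.2 ⟨by omega, by omega⟩
        have := row_nonneg a x i (n - 1)
        omega
    rw [hrow]
    omega
  · rw [if_neg hik]
    have hrow : row a x i (n - 1) = 0 := by
      refine row_zero_of_none a x i _ 0 ?_
      intro j hj
      rcases List.mem_range'_1.1 hj with ⟨hij, hjr⟩
      have hjn : j < n := by omega
      have := hgt j (by omega) (by omega)
      rw [List.getD_eq_getElem a 0 (by omega : j < a.length)]
      omega
    rw [hrow]
    omega

-- ===== VERDICT (by name: the statement is the Claim_ definition above) =====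
lemma main_eq (a : List Int) (x : Int) (hs : a.Pairwise (· ≤ ·)) :
    tpGo a x 0 0 (a.length - 1) =
      (List.range a.length).foldl (fun best i =>
        let j : Int := (PySem.List.bisectRight a (x - a.getD i 0) : Int) - 1
        if (i : Int) < j then max best (a.getD i 0 + a.getD j.toNat 0) else best) 0 := by
  rcases Nat.eq_zero_or_pos a.length with h0 | hpos
  · rw [h0, tpGo]
    simp
  · rw [tpGo_eq a x hs (a.length - 1 - 0) 0 (a.length - 1) 0 rfl (by omega) le_rfl]
    rw [alt_fold_eq a x hs hpos]
    have := Mw_nonneg a x 0 (a.length - 1)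
    omega

theorem max_pair_sum_spec : Claim_equal_max_pair_sum := by
  intro prices x _
  unfold Spec_max_pair_sum max_pair_sum max_pair_sum_alt
  exact main_eq (PySem.List.sorted prices (fun v => v)) x
    (PySem.List.sorted_pairwise prices (fun v => v))
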